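-- pv_equiv track=rewrite | github.com/cmbenello/141-discussion-final | solutions/conditionals_loops_sols.py | cl_17_count_negatives_until_positive
-- ===== SOURCE A (Python) =====
-- from typing import List, Optional
--
-- def cl_17_count_negatives_until_positive(lst: List[int]) -> int:
--     count = 0
--     for val in lst:
--         if val > 0:
--             break
--         if val < 0:
--             count += 1
--     return count
-- ===== SOURCE B (Python) =====
-- from functools import reduce
--
-- def cl_17_count_negatives_until_positive(lst):
--     # Fold right-to-left: a positive value resets the running count to 0,
--     # a negative adds 1; what survives is the count left of the first positive.
--     def step(acc, v):
--         if v > 0: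
--             return 0
--         return acc + 1 if v < 0 else acc
--     return reduce(step, reversed(lst), 0)
-- ===== Notes on version B (the rewrite author's own statement) =====
-- stated objective: alternative
-- what changed: Replaces the forward loop-with-break by a right-to-left reduce whose accumulator is reset to 0 at every positive element, so the surviving count is exactly the negatives before the first positive; opposite traversal order, no early exit.
import Mathlib
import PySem

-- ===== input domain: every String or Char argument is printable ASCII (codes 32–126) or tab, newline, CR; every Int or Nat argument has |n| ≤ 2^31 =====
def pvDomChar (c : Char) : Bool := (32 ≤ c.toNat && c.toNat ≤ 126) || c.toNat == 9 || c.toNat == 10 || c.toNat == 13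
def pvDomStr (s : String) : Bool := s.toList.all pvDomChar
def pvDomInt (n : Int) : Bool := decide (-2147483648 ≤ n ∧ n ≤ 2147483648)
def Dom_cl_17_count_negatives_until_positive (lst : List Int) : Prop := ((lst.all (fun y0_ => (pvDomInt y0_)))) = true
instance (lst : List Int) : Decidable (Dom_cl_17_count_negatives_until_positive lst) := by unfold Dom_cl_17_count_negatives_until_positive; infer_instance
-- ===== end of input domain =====

-- B replaces A's forward loop-with-break by a right-to-left fold that resets its count at every positive element (alternative).


-- ===== PORT A =====
-- A's loop with break: structural recursion over the list carrying the count
def clALoop (lst : List Int) (count : Int) : Int :=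
  match lst with
  | [] => count
  | v :: rest =>
    if v > 0 then count
    else if v < 0 then clALoop rest (count + 1)
    else clALoop rest count

def cl_17_count_negatives_until_positive (lst : List Int) : Int :=
  clALoop lst 0

-- ===== PORT B =====
-- B's step function: positive resets the running count, negative adds one
def clBStep (acc : Int) (v : Int) : Int :=
  if v > 0 then 0
  else if v < 0 then acc + 1 else acc

-- reduce(step, reversed(lst), 0)
def cl_17_count_negatives_until_positive_alt (lst : List Int) : Int :=
  lst.reverse.foldl clBStep 0

-- ===== PRECONDITION & SPEC =====
def Spec_cl_17_count_negatives_until_positive (lst : List Int) (out : Int) : Prop := out = cl_17_count_negatives_until_positive_alt lst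
instance (lst : List Int) (out : Int) : Decidable (Spec_cl_17_count_negatives_until_positive lst out) := by unfold Spec_cl_17_count_negatives_until_positive; infer_instance

-- ===== CLAIM (what is proved, stated in full; the proofs are below) =====
def Claim_equal_cl_17_count_negatives_until_positive : Prop := ∀ (lst : List Int), Dom_cl_17_count_negatives_until_positive lst → Spec_cl_17_count_negatives_until_positive lst (cl_17_count_negatives_until_positive lst)

-- ===== LEMMAS AND PROOFS =====

-- the backward fold over lst.reverse is the right fold of clBStep over lst
theorem altB_foldr (lst : List Int) :
    cl_17_count_negatives_until_positive_alt lst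
      = lst.foldr (fun v acc => clBStep acc v) 0 := by
  unfold cl_17_count_negatives_until_positive_alt
  rw [List.foldl_reverse]

-- loop invariant: A's loop equals the accumulator plus B's right fold of the remaining list
theorem clALoop_eq (lst : List Int) (count : Int) :
    clALoop lst count = count + lst.foldr (fun v acc => clBStep acc v) 0 := by
  induction lst generalizing count with
  | nil => simp [clALoop]
  | cons v rest ih =>
    by_cases h : v > 0
    · simp [clALoop, h, clBStep]
    · by_cases hn : v < 0
      · simp [clALoop, h, hn, clBStep, ih]; omega
      · simp [clALoop, h, hn, clBStep, ih]

-- ===== VERDICT (by name: the statement is the Claim_ definition above) =====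
theorem cl_17_count_negatives_until_positive_spec : Claim_equal_cl_17_count_negatives_until_positive := by
  intro lst _
  unfold Spec_cl_17_count_negatives_until_positive cl_17_count_negatives_until_positive
  rw [altB_foldr, clALoop_eq]
  simp
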